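-- pv_equiv track=rewrite | github.com/korawica/dup-util | src/ddeutil/core/base/sorting.py | sort_list_by_priority
-- ===== SOURCE A (Python) =====
-- from collections import defaultdict
-- from functools import partial
-- from typing import (
--     Any,
--     Dict,
--     Iterable,
--     List,
--     Optional,
--     TypeVar,
--     Union,
-- )
--
-- T = TypeVar("T")
--
-- def sort_list_by_priority(
--     values: Union[Iterable, List[T]],
--     priority: List[T],
--     reverse: bool = False,
--     mode: Optional[str] = None,
-- ) -> List[T]:
--     """Sorts an iterable according to a list of priority items.
--
--     Examples:
--         >>> sort_list_by_priority(values=[1, 2, 2, 3], priority=[2, 3, 1])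
--         [2, 2, 3, 1]
--         >>> sort_list_by_priority(values={1, 2, 3}, priority=[2,3])
--         [2, 3, 1]
--     """
--     _mode: str = mode or "default"
--
--     def _enumerate(_values, _priority, _reverse):
--         priority_dict = {k: i for i, k in enumerate(_priority)}
--
--         def priority_getter(value):
--             return priority_dict.get(value, len(_values))
--
--         return sorted(_values, key=priority_getter, reverse=_reverse)
--
--     def default(_values, _priority, _reverse):
--         priority_dict = defaultdict(
--             lambda: len(_priority),
--             zip(
--                 _priority,
--                 range(len(_priority)),
--             ),
--         )
--         priority_getter = priority_dict.__getitem__  # dict.get(key)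
--         return sorted(_values, key=priority_getter, reverse=_reverse)
--
--     switcher: Dict[str, partial] = {
--         "chain": partial(default, values, priority, reverse),
--         "enumerate": partial(_enumerate, values, priority, reverse),
--     }
--
--     func = switcher.get(_mode, lambda: [])
--     return func()
-- ===== SOURCE B (Python) =====
-- def sort_list_by_priority(values, priority, reverse=False, mode=None):
--     _mode = mode or "default"
--     if _mode == "chain":
--         miss = len(priority)
--     elif _mode == "enumerate":
--         values = list(values)
--         miss = len(values)
--     else:
--         return []
--     idx = {k: i for i, k in enumerate(priority)}
--     buckets = [[] for _ in range(max(miss, len(priority)) + 1)]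
--     for v in values:
--         buckets[idx.get(v, miss)].append(v)
--     if reverse:
--         buckets.reverse()
--     return [v for b in buckets for v in b]
-- ===== Notes on version B (the rewrite author's own statement) =====
-- stated objective: alternative
-- what changed: Replaces A's dict-dispatch plus stable comparison sort (sorted with a priority-index key) by a single-pass stable bucket sort: one dict of priority indices, one pass appending each value to its key's bucket, then concatenating the buckets (in reversed bucket order for reverse=True).
import Mathlib
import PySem

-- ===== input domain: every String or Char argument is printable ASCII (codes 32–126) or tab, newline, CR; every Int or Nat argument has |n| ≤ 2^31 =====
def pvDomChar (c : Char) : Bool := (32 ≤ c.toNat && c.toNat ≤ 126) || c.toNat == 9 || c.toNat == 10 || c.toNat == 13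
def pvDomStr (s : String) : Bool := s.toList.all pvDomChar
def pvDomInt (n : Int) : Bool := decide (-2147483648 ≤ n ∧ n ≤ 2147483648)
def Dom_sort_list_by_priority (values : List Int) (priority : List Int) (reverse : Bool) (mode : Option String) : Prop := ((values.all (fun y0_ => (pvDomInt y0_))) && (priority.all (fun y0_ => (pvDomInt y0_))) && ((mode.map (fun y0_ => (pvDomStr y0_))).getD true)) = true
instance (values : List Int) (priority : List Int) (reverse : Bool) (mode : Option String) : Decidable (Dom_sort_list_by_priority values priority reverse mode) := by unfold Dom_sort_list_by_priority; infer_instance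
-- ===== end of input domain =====

-- B replaces A's comparison sort (stable sorted with a priority-index key) by a stable
-- bucket sort over the bounded key range 0..max(miss, len(priority)); objective: alternative.

-- ===== PORT A =====
-- A, transliterated: _mode = mode or "default"; switcher dispatch; each branch builds a
-- priority dict and calls sorted(values, key=…, reverse=reverse) (Python's stable sort).
def sort_list_by_priority (values : List Int) (priority : List Int) (reverse : Bool) (mode : Option String) : List Int :=
  let _mode : String := match mode with
    | none => "default"
    | some s => if s = "" then "default" else s  -- Python `or`: "" is falsy
  if _mode = "chain" then
    -- default(): defaultdict(lambda: len(_priority), zip(_priority, range(len(_priority))))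
    let priority_dict : PySem.Dict Int Int :=
      PySem.Dict.ofList (List.zip priority (PySem.List.pyRange 0 (priority.length : Int) 1))
    PySem.List.sorted values (fun v => priority_dict.getD v (priority.length : Int)) reverse
  else if _mode = "enumerate" then
    -- _enumerate(): {k: i for i, k in enumerate(_priority)}; .get(value, len(_values))
    let priority_dict : PySem.Dict Int Int :=
      (PySem.List.enumerate priority 0).foldl (fun d p => d.insert p.2 p.1) PySem.Dict.empty
    PySem.List.sorted values (fun v => priority_dict.getD v (values.length : Int)) reverse
  else []

-- ===== PORT B =====
-- idx = {k: i for i, k in enumerate(priority)}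
def pvIdx (priority : List Int) : PySem.Dict Int Int :=
  (PySem.List.enumerate priority 0).foldl (fun d p => d.insert p.2 p.1) PySem.Dict.empty

-- B, transliterated: pick miss per mode (else return []); one pass appending each value to
-- buckets[idx.get(v, miss)]; reverse the bucket list if reverse; flatten.
-- (idx values and miss are ≥ 0 and < len(buckets), so `.toNat`/`modify` is exact here.)
def sort_list_by_priority_alt (values : List Int) (priority : List Int) (reverse : Bool) (mode : Option String) : List Int :=
  let _mode : String := match mode with
    | none => "default"
    | some s => if s = "" then "default" else s
  let miss? : Option Nat :=
    if _mode = "chain" then some priority.length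
    else if _mode = "enumerate" then some values.length
    else none
  match miss? with
  | none => []
  | some miss =>
    let idx := pvIdx priority
    let nb : Nat := max miss priority.length + 1
    let buckets := values.foldl
      (fun bs v => bs.modify (idx.getD v (miss : Int)).toNat (fun b => b ++ [v]))
      (List.replicate nb [])
    (if reverse then buckets.reverse else buckets).flatten

-- ===== PRECONDITION & SPEC =====
def Spec_sort_list_by_priority (values : List Int) (priority : List Int) (reverse : Bool) (mode : Option String) (out : List Int) : Prop := out = sort_list_by_priority_alt values priority reverse mode
instance (values : List Int) (priority : List Int) (reverse : Bool) (mode : Option String) (out : List Int) : Decidable (Spec_sort_list_by_priority values priority reverse mode out) := by unfold Spec_sort_list_by_priority; infer_instance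

-- ===== CLAIM (what is proved, stated in full; the proofs are below) =====
def Claim_equal_sort_list_by_priority : Prop := ∀ (values : List Int) (priority : List Int) (reverse : Bool) (mode : Option String), Dom_sort_list_by_priority values priority reverse mode → Spec_sort_list_by_priority values priority reverse mode (sort_list_by_priority values priority reverse mode)

-- ===== LEMMAS AND PROOFS =====

-- scan past elements the insertion does not go before
lemma insertBy_append_not {α : Type} (p : α → α → Bool) (x : α) (L R : List α)
    (hL : ∀ y ∈ L, p x y = false) :
    PySem.List.insertBy p x (L ++ R) = L ++ PySem.List.insertBy p x R := by
  induction L with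
  | nil => simp
  | cons y t ih =>
    simp only [List.cons_append, PySem.List.insertBy, hL y (by simp)]
    simp only [Bool.false_eq_true, if_false, List.cons.injEq, true_and]
    exact ih (fun z hz => hL z (by simp [hz]))

lemma insertBy_all_true {α : Type} (p : α → α → Bool) (x : α) (R : List α)
    (hR : ∀ y ∈ R, p x y = true) :
    PySem.List.insertBy p x R = x :: R := by
  cases R with
  | nil => rfl
  | cons y t => simp [PySem.List.insertBy, hR y (by simp)]

-- insertion into a flatten whose prefix blocks never accept x and whose suffix blocks always do
lemma insertBy_flatten_split {α : Type} (p : α → α → Bool) (x : α) (L R : List (List α))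
    (hL : ∀ b ∈ L, ∀ y ∈ b, p x y = false) (hR : ∀ b ∈ R, ∀ y ∈ b, p x y = true) :
    PySem.List.insertBy p x (L.flatten ++ R.flatten) = L.flatten ++ x :: R.flatten := by
  rw [insertBy_append_not]
  · rw [insertBy_all_true]
    intro y hy
    rw [List.mem_flatten] at hy
    obtain ⟨b, hb, hyb⟩ := hy
    exact hR b hb y hyb
  · intro y hy
    rw [List.mem_flatten] at hy
    obtain ⟨b, hb, hyb⟩ := hy
    exact hL b hb y hyb

-- stable ascending sort = concatenation of the key buckets in increasing key order
lemma sorted_eq_buckets (values : List Int) (key : Int → Int) (nb : Nat)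
    (h : ∀ v ∈ values, 0 ≤ key v ∧ key v < (nb : Int)) :
    PySem.List.sorted values key false
      = ((List.range nb).map (fun (j : Nat) => values.filter (fun v => key v = (j : Int)))).flatten := by
  induction values using List.reverseRecOn with
  | nil => simp [PySem.List.sorted]
  | append_singleton vs x ih =>
    have hx := h x (by simp)
    have hvs : ∀ v ∈ vs, 0 ≤ key v ∧ key v < (nb : Int) := fun v hv => h v (by simp [hv])
    have hsorted : PySem.List.sorted (vs ++ [x]) key false
        = PySem.List.insertBy (fun a b => decide (key a < key b)) x (PySem.List.sorted vs key false) := by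
      rw [PySem.List.sorted_eq_foldl_insertBy, PySem.List.sorted_eq_foldl_insertBy,
        List.foldl_append, List.foldl_cons, List.foldl_nil]
    have hkx : key x = ((key x).toNat : Int) := (Int.toNat_of_nonneg hx.1).symm
    have hmnb : (key x).toNat + 1 ≤ nb := by omega
    have hrange : List.range nb
        = List.range ((key x).toNat + 1)
          ++ (List.range (nb - ((key x).toNat + 1))).map ((key x).toNat + 1 + ·) := by
      conv_lhs => rw [show nb = ((key x).toNat + 1) + (nb - ((key x).toNat + 1)) by omega]
      exact List.range_add
    rw [hsorted, ih hvs, hrange]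
    simp only [List.map_append, List.flatten_append, List.map_map]
    rw [insertBy_flatten_split]
    · -- prefix buckets: only bucket (key x).toNat changes, by appending x at its end
      obtain ⟨hx1, hx2⟩ := hx
      have hsufEq :
          (List.range (nb - ((key x).toNat + 1))).map
              ((fun (j : Nat) => (vs ++ [x]).filter (fun v => decide (key v = (j : Int)))) ∘
                (fun t => (key x).toNat + 1 + t))
            = (List.range (nb - ((key x).toNat + 1))).map
              ((fun (j : Nat) => vs.filter (fun v => decide (key v = (j : Int)))) ∘
                (fun t => (key x).toNat + 1 + t)) := by
        apply List.map_congr_left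
        intro t ht
        simp only [Function.comp_apply]
        rw [List.filter_append]
        have hne : (decide (key x = (((key x).toNat + 1 + t : Nat) : Int))) = false := by
          rw [decide_eq_false_iff_not]; omega
        simp only [List.filter_cons, List.filter_nil, hne]
        simp
      rw [hsufEq, List.range_succ]
      simp only [List.map_append, List.flatten_append, List.map_cons, List.map_nil,
        List.flatten_cons, List.flatten_nil, List.append_nil]
      have hpre : ∀ j ∈ List.range ((key x).toNat),
          ((vs ++ [x]).filter (fun v => decide (key v = (j : Int))))
            = vs.filter (fun v => decide (key v = (j : Int))) := by
        intro j hj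
        rw [List.mem_range] at hj
        rw [List.filter_append]
        have hne : (decide (key x = (j : Int))) = false := by
          rw [decide_eq_false_iff_not]; omega
        simp only [List.filter_cons, List.filter_nil, hne]
        simp
      have hself : (vs ++ [x]).filter (fun v => decide (key v = (((key x).toNat : Nat) : Int)))
          = vs.filter (fun v => decide (key v = (((key x).toNat : Nat) : Int))) ++ [x] := by
        rw [List.filter_append]
        have hT : (decide (key x = (((key x).toNat : Nat) : Int))) = true := by
          rw [decide_eq_true_eq]; exact hkx
        simp only [List.filter_cons, List.filter_nil, hT]
        simp
      rw [List.map_congr_left hpre, hself]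
      simp
    · -- every element already in a bucket j ≤ (key x).toNat has key ≤ key x
      intro b hb y hy
      simp only [List.mem_map, List.mem_range] at hb
      obtain ⟨j, hj, rfl⟩ := hb
      have := List.of_mem_filter hy
      simp only [decide_eq_true_eq] at this
      simp only [decide_eq_false_iff_not, not_lt, this]
      omega
    · -- every element in a bucket j > (key x).toNat has key > key x
      intro b hb y hy
      simp only [List.mem_map, List.mem_range] at hb
      obtain ⟨t, ht, rfl⟩ := hb
      have := List.of_mem_filter hy
      simp only [decide_eq_true_eq] at this
      simp only [decide_eq_true_eq, this]
      push_cast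
      omega

-- stable descending sort = the same buckets, bucket list reversed
lemma sorted_rev_eq_buckets (values : List Int) (key : Int → Int) (nb : Nat)
    (h : ∀ v ∈ values, 0 ≤ key v ∧ key v < (nb : Int)) :
    PySem.List.sorted values key true
      = (((List.range nb).map (fun (j : Nat) => values.filter (fun v => key v = (j : Int)))).reverse).flatten := by
  induction values using List.reverseRecOn with
  | nil => simp [PySem.List.sorted]
  | append_singleton vs x ih =>
    have hx := h x (by simp)
    obtain ⟨hx1, hx2⟩ := hx
    have hvs : ∀ v ∈ vs, 0 ≤ key v ∧ key v < (nb : Int) := fun v hv => h v (by simp [hv])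
    have hsorted : PySem.List.sorted (vs ++ [x]) key true
        = PySem.List.insertBy (fun a b => decide (key b < key a)) x (PySem.List.sorted vs key true) := by
      rw [PySem.List.sorted_rev_eq_foldl_insertBy, PySem.List.sorted_rev_eq_foldl_insertBy,
        List.foldl_append, List.foldl_cons, List.foldl_nil]
    have hkx : key x = ((key x).toNat : Int) := (Int.toNat_of_nonneg hx1).symm
    have hmnb : (key x).toNat + 1 ≤ nb := by omega
    have hrange : List.range nb
        = List.range ((key x).toNat + 1)
          ++ (List.range (nb - ((key x).toNat + 1))).map ((key x).toNat + 1 + ·) := by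
      conv_lhs => rw [show nb = ((key x).toNat + 1) + (nb - ((key x).toNat + 1)) by omega]
      exact List.range_add
    have harg :
        (((List.range nb).map (fun (j : Nat) => vs.filter (fun v => decide (key v = (j : Int))))).reverse).flatten
          = (((List.range (nb - ((key x).toNat + 1))).map
                ((fun (j : Nat) => vs.filter (fun v => decide (key v = (j : Int)))) ∘
                  (fun t => (key x).toNat + 1 + t))).reverse
              ++ [vs.filter (fun v => decide (key v = (((key x).toNat : Nat) : Int)))]).flatten
            ++ (((List.range ((key x).toNat)).map
                (fun (j : Nat) => vs.filter (fun v => decide (key v = (j : Int))))).reverse).flatten := by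
      rw [hrange, List.range_succ]
      simp [List.reverse_append, List.flatten_append, List.append_assoc]
    rw [hsorted, ih hvs, harg, insertBy_flatten_split]
    · -- recombine: x lands at the end of bucket (key x).toNat, first block of the reversed list
      have hsufEq :
          (List.range (nb - ((key x).toNat + 1))).map
              ((fun (j : Nat) => (vs ++ [x]).filter (fun v => decide (key v = (j : Int)))) ∘
                (fun t => (key x).toNat + 1 + t))
            = (List.range (nb - ((key x).toNat + 1))).map
              ((fun (j : Nat) => vs.filter (fun v => decide (key v = (j : Int)))) ∘
                (fun t => (key x).toNat + 1 + t)) := by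
        apply List.map_congr_left
        intro t ht
        simp only [Function.comp_apply]
        rw [List.filter_append]
        have hne : (decide (key x = (((key x).toNat + 1 + t : Nat) : Int))) = false := by
          rw [decide_eq_false_iff_not]; omega
        simp only [List.filter_cons, List.filter_nil, hne]
        simp
      have hpre : ∀ j ∈ List.range ((key x).toNat),
          ((vs ++ [x]).filter (fun v => decide (key v = (j : Int))))
            = vs.filter (fun v => decide (key v = (j : Int))) := by
        intro j hj
        rw [List.mem_range] at hj
        rw [List.filter_append]
        have hne : (decide (key x = (j : Int))) = false := by
          rw [decide_eq_false_iff_not]; omega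
        simp only [List.filter_cons, List.filter_nil, hne]
        simp
      have hself : (vs ++ [x]).filter (fun v => decide (key v = (((key x).toNat : Nat) : Int)))
          = vs.filter (fun v => decide (key v = (((key x).toNat : Nat) : Int))) ++ [x] := by
        rw [List.filter_append]
        have hT : (decide (key x = (((key x).toNat : Nat) : Int))) = true := by
          rw [decide_eq_true_eq]; exact hkx
        simp only [List.filter_cons, List.filter_nil, hT]
        simp
      rw [hrange, List.range_succ]
      simp only [List.map_append, List.reverse_append, List.flatten_append, List.map_map,
        List.map_cons, List.map_nil, List.reverse_cons, List.reverse_nil, List.nil_append,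
        List.flatten_cons]
      rw [hsufEq, List.map_congr_left hpre, hself]
      simp [List.append_assoc]
    · -- prefix blocks (keys ≥ key x) never accept x under the reverse comparison
      intro b hb y hy
      rw [List.mem_append] at hb
      rcases hb with hb | hb
      · rw [List.mem_reverse] at hb
        simp only [List.mem_map, List.mem_range] at hb
        obtain ⟨t, ht, rfl⟩ := hb
        have := List.of_mem_filter hy
        simp only [decide_eq_true_eq] at this
        simp only [decide_eq_false_iff_not, not_lt, this]
        push_cast
        omega
      · rw [List.mem_singleton] at hb
        subst hb
        have := List.of_mem_filter hy
        simp only [decide_eq_true_eq] at this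
        simp only [decide_eq_false_iff_not, not_lt, this]
        omega
    · -- suffix blocks (keys < key x) all accept x
      intro b hb y hy
      rw [List.mem_reverse] at hb
      simp only [List.mem_map, List.mem_range] at hb
      obtain ⟨j, hj, rfl⟩ := hb
      have := List.of_mem_filter hy
      simp only [decide_eq_true_eq] at this
      simp only [decide_eq_true_eq, this]
      omega

lemma modify_map_range {α : Type} (F : Nat → List α) (nb i : Nat) (v : α) :
    ((List.range nb).map F).modify i (fun b => b ++ [v])
      = (List.range nb).map (fun j => if j = i then F j ++ [v] else F j) := by
  apply List.ext_getElem
  · simp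
  · intro j h1 h2
    simp only [List.length_modify, List.length_map, List.length_range] at h1
    rw [List.getElem_modify]
    simp only [List.getElem_map, List.getElem_range]
    by_cases hj : i = j
    · simp [hj]
    · simp [hj, Ne.symm hj]

-- B's bucket-filling fold, characterised bucket by bucket
lemma foldl_modify_buckets (values : List Int) (k : Int → Nat) (nb : Nat) (F : Nat → List Int)
    (h : ∀ v ∈ values, k v < nb) :
    values.foldl (fun bs v => bs.modify (k v) (fun b => b ++ [v])) ((List.range nb).map F)
      = (List.range nb).map (fun j => F j ++ values.filter (fun v => k v = j)) := by
  induction values generalizing F with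
  | nil => simp
  | cons v vs ih =>
    rw [List.foldl_cons, modify_map_range]
    rw [ih (fun j => if j = k v then F j ++ [v] else F j) (fun w hw => h w (by simp [hw]))]
    apply List.map_congr_left
    intro j hj
    by_cases hkv : k v = j
    · simp [hkv]
    · simp [Ne.symm hkv, hkv]

-- zip(priority, range(len(priority))) is enumerate with the pair swapped
lemma zip_pyRange_eq_enumerate_swap (xs : List Int) (s : Int) :
    List.zip xs (PySem.List.pyRange s (s + (xs.length : Int)) 1)
      = (PySem.List.enumerate xs s).map (fun p => (p.2, p.1)) := by
  induction xs generalizing s with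
  | nil => simp [PySem.List.enumerate]
  | cons x t ih =>
    rw [PySem.List.pyRange_one_cons (by simp only [List.length_cons]; push_cast; omega)]
    simp only [PySem.List.enumerate, List.map_cons, List.zip_cons_cons, List.length_cons]
    push_cast
    rw [show s + ((t.length : Int) + 1) = s + 1 + (t.length : Int) by ring, ih (s + 1)]

-- the looked-up key is either the default or one of the stored enumerate indices
lemma getD_foldl_insert_swap (ps : List (Int × Int)) (d : PySem.Dict Int Int) (v dflt : Int) :
    (ps.foldl (fun d p => d.insert p.2 p.1) d).getD v dflt = d.getD v dflt ∨
      (ps.foldl (fun d p => d.insert p.2 p.1) d).getD v dflt ∈ ps.map (·.1) := by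
  induction ps generalizing d with
  | nil => exact Or.inl rfl
  | cons p t ih =>
    simp only [List.foldl_cons, List.map_cons]
    rcases ih (d.insert p.2 p.1) with h | h
    · rw [h, PySem.Dict.getD_insert]
      split_ifs
      · exact Or.inr (by simp)
      · exact Or.inl rfl
    · exact Or.inr (by simp [h])

lemma getD_pvIdx_cases (priority : List Int) (v dflt : Int) :
    (pvIdx priority).getD v dflt = dflt ∨
      ∃ i : Nat, i < priority.length ∧ (pvIdx priority).getD v dflt = (i : Int) := by
  have h0 := getD_foldl_insert_swap (PySem.List.enumerate priority 0) PySem.Dict.empty v dflt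
  rw [show ((PySem.List.enumerate priority 0).foldl (fun d p => d.insert p.2 p.1) PySem.Dict.empty) = pvIdx priority from rfl] at h0
  rcases h0 with h | h
  · exact Or.inl (by simpa [PySem.Dict.getD_empty] using h)
  · rw [PySem.List.map_fst_enumerate] at h
    rw [PySem.List.mem_pyRange_one] at h
    refine Or.inr ⟨((pvIdx priority).getD v dflt).toNat, ?_, ?_⟩
    · simp only [zero_add] at h; omega
    · simp only [zero_add] at h; omega

-- the looked-up key is always in [0, max miss len(priority)]
lemma key_bounds (priority : List Int) (miss : Nat) (v : Int) :
    0 ≤ (pvIdx priority).getD v (miss : Int) ∧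
      (pvIdx priority).getD v (miss : Int) < ((max miss priority.length + 1 : Nat) : Int) := by
  rcases getD_pvIdx_cases priority v (miss : Int) with h | ⟨i, hi, h⟩ <;>
    rw [h] <;> constructor <;> push_cast <;> omega

-- the two ports agree on one dispatch branch, for a fixed miss value
lemma ports_agree_branch (values priority : List Int) (reverse : Bool) (miss : Nat) :
    PySem.List.sorted values (fun v => (pvIdx priority).getD v (miss : Int)) reverse
      = (if reverse then
          (values.foldl (fun bs v => bs.modify ((pvIdx priority).getD v (miss : Int)).toNat (fun b => b ++ [v]))
            (List.replicate (max miss priority.length + 1) [])).reverse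
        else
          values.foldl (fun bs v => bs.modify ((pvIdx priority).getD v (miss : Int)).toNat (fun b => b ++ [v]))
            (List.replicate (max miss priority.length + 1) [])).flatten := by
  have hrep : (List.replicate (max miss priority.length + 1) ([] : List Int))
      = (List.range (max miss priority.length + 1)).map (fun _ => []) := by
    simp [List.map_const']
  have hbuck : values.foldl
        (fun bs v => bs.modify ((pvIdx priority).getD v (miss : Int)).toNat (fun b => b ++ [v]))
        (List.replicate (max miss priority.length + 1) [])
      = (List.range (max miss priority.length + 1)).map
          (fun (j : Nat) => values.filter
            (fun v => ((pvIdx priority).getD v (miss : Int)).toNat = j)) := by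
    rw [hrep, foldl_modify_buckets]
    · simp
    · intro v _
      have h2 := (key_bounds priority miss v).2
      omega
  have hfilt : ∀ j ∈ List.range (max miss priority.length + 1),
      values.filter (fun v => decide (((pvIdx priority).getD v (miss : Int)).toNat = j))
        = values.filter (fun v => decide ((pvIdx priority).getD v (miss : Int) = (j : Int))) := by
    intro j _
    apply List.filter_congr
    intro v _
    have h1 := (key_bounds priority miss v).1
    simp only [decide_eq_decide]
    omega
  cases reverse with
  | false =>
    rw [if_neg (by simp), hbuck,
      sorted_eq_buckets values _ (max miss priority.length + 1) (fun v _ => key_bounds priority miss v),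
      List.map_congr_left hfilt]
  | true =>
    rw [if_pos rfl, hbuck,
      sorted_rev_eq_buckets values _ (max miss priority.length + 1) (fun v _ => key_bounds priority miss v),
      List.map_congr_left hfilt]

-- A's chain-branch dict (built from zip) is B's idx dict
lemma dict_chain_eq (priority : List Int) :
    PySem.Dict.ofList (List.zip priority (PySem.List.pyRange 0 (priority.length : Int) 1))
      = pvIdx priority := by
  have h := zip_pyRange_eq_enumerate_swap priority 0
  rw [zero_add] at h
  simp only [PySem.Dict.ofList, PySem.Dict.update, pvIdx, h, List.foldl_map]

-- ===== VERDICT (by name: the statement is the Claim_ definition above) =====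
theorem sort_list_by_priority_spec : Claim_equal_sort_list_by_priority := by
  intro values priority reverse mode _
  unfold Spec_sort_list_by_priority sort_list_by_priority sort_list_by_priority_alt
  cases mode with
  | none =>
    simp
  | some s =>
    by_cases hs : s = ""
    · simp [hs]
    · by_cases hc : s = "chain"
      · simp only [hc]
        rw [dict_chain_eq]
        exact ports_agree_branch values priority reverse priority.length
      · by_cases he : s = "enumerate"
        · simp only [he]
          exact ports_agree_branch values priority reverse values.length
        · simp [hs, hc, he]
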